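-- pv_equiv track=rewrite | github.com/aibyjgwillis/tools | plugins/lite-tools/skills/multiple-terminals/multiple-terminals.py | calculate_layout
-- ===== SOURCE A (Python) =====
-- import math
--
-- def calculate_layout(count, layout, bounds, row_gap=0):
--     """Calculate window rects for the given layout.
--
--     row_gap: vertical pixels reserved between rows to prevent title bar overlap.
--     Applied to grid and rows layouts only.
--     """
--     x0, y0, x1, y1 = bounds
--     width = x1 - x0
--     height = y1 - y0
--     rects = []
--
--     if layout == "side-by-side":
--         col_width = width // count
--         for i in range(count):
--             l = x0 + i * col_width
--             r = x0 + (i + 1) * col_width if i < count - 1 else x1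
--             rects.append((l, y0, r, y1))
--
--     elif layout == "grid":
--         cols = math.ceil(math.sqrt(count))
--         rows = math.ceil(count / cols)
--         total_gap = row_gap * (rows - 1)
--         usable_height = height - total_gap
--         col_width = width // cols
--         row_height = usable_height // rows
--         for i in range(count):
--             row = i // cols
--             col = i % cols
--             l = x0 + col * col_width
--             t = y0 + row * (row_height + row_gap)
--             r = x0 + (col + 1) * col_width if col < cols - 1 else x1
--             b = t + row_height if row < rows - 1 else y1
--             rects.append((l, t, r, b))
--
--     elif layout == "rows":
--         total_gap = row_gap * (count - 1)
--         usable_height = height - total_gap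
--         row_height = usable_height // count
--         for i in range(count):
--             t = y0 + i * (row_height + row_gap)
--             b = t + row_height if i < count - 1 else y1
--             rects.append((x0, t, x1, b))
--
--     elif layout == "stacked":
--         for _ in range(count):
--             rects.append((x0, y0, x1, y1))
--
--     return rects
-- ===== SOURCE B (Python) =====
-- import math
--
-- def calculate_layout(count, layout, bounds, row_gap=0):
--     """Calculate window rects for the given layout.
--
--     Different decomposition: build the list of column intervals (l, r) and the
--     list of row intervals (t, b) once, then take their cross product (row-major)
--     truncated to count windows.  No per-window division/modulo arithmetic.
--     """
--     x0, y0, x1, y1 = bounds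
--     if layout == "stacked":
--         return [(x0, y0, x1, y1)] * max(count, 0)
--     if layout == "side-by-side":
--         cols, rows, gap = count, 1, 0
--     elif layout == "grid":
--         s = math.isqrt(count)
--         cols = s if s * s == count else s + 1
--         rows = -(-count // cols)
--         gap = row_gap
--     elif layout == "rows":
--         cols, rows, gap = 1, count, row_gap
--     else:
--         return []
--     col_w = (x1 - x0) // cols
--     row_h = (y1 - y0 - gap * (rows - 1)) // rows
--     lefts = [x0 + c * col_w for c in range(cols)]
--     col_ivs = list(zip(lefts, lefts[1:] + [x1]))
--     tops = [y0 + r * (row_h + gap) for r in range(rows)]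
--     col_ivs_bottoms = [t + row_h for t in tops[:-1]] + [y1]
--     row_ivs = list(zip(tops, col_ivs_bottoms))
--     rects = [(l, t, r, b) for (t, b) in row_ivs for (l, r) in col_ivs]
--     return rects[:count]
-- ===== Notes on version B (the rewrite author's own statement) =====
-- stated objective: alternative
-- what changed: B precomputes the column-interval list and the row-interval list once (zip of edge lists) and returns their row-major cross product truncated to count, instead of A's per-window index arithmetic (i//cols, i%cols and per-branch loops).
import Mathlib
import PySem

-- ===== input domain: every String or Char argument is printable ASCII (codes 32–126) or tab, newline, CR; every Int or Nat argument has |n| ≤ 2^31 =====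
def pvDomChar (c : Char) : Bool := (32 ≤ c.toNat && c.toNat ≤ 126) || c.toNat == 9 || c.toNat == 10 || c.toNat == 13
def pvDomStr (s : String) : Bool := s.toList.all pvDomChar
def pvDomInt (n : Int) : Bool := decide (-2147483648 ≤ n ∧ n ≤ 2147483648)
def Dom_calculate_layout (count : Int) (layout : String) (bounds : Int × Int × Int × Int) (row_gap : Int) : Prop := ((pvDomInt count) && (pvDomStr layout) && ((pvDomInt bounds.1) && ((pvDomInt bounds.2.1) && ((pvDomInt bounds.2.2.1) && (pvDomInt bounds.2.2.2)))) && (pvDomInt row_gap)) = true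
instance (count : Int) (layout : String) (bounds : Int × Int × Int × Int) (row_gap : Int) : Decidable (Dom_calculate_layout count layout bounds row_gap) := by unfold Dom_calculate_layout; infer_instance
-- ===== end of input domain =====

-- B builds the column-interval and row-interval lists once and returns their cross
-- product truncated to count (no per-window div/mod): a simpler staged decomposition.


-- ===== PORT A =====
-- Exact integer model of Python's `math.ceil(math.sqrt(n))` for n in Dom (|n| ≤ 2^31):
-- the double sqrt of such a nonnegative int never rounds across an integer, so the
-- float ceil equals the integer ceiling square root.
def pvCeilSqrtA (n : Int) : Int :=
  let s := Nat.sqrt n.toNat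
  if (s * s : Int) = n then (s : Int) else (s : Int) + 1

-- Exact integer model of Python's `math.ceil(a / b)` for 0 < b, |a|,|b| ≤ 2^31:
-- the float quotient never rounds across an integer there, so ceil(a/b) = -((-a)//b).
def pvCeilDivA (a b : Int) : Int := -(PySem.Int.floordiv (-a) b)

def calculate_layout (count : Int) (layout : String) (bounds : Int × Int × Int × Int) (row_gap : Int) : List (Int × Int × Int × Int) :=
  let x0 := bounds.1; let y0 := bounds.2.1; let x1 := bounds.2.2.1; let y1 := bounds.2.2.2
  let width := x1 - x0
  let height := y1 - y0
  if layout = "side-by-side" then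
    let col_width := PySem.Int.floordiv width count
    (PySem.List.pyRange 0 count).foldl (fun rects i =>
      rects ++ [(x0 + i * col_width, y0,
                 if i < count - 1 then x0 + (i + 1) * col_width else x1, y1)]) []
  else if layout = "grid" then
    let cols := pvCeilSqrtA count
    let rows := pvCeilDivA count cols
    let total_gap := row_gap * (rows - 1)
    let usable_height := height - total_gap
    let col_width := PySem.Int.floordiv width cols
    let row_height := PySem.Int.floordiv usable_height rows
    (PySem.List.pyRange 0 count).foldl (fun rects i =>
      let row := PySem.Int.floordiv i cols
      let col := PySem.Int.mod i cols
      let l := x0 + col * col_width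
      let t := y0 + row * (row_height + row_gap)
      let r := if col < cols - 1 then x0 + (col + 1) * col_width else x1
      let b := if row < rows - 1 then t + row_height else y1
      rects ++ [(l, t, r, b)]) []
  else if layout = "rows" then
    let total_gap := row_gap * (count - 1)
    let usable_height := height - total_gap
    let row_height := PySem.Int.floordiv usable_height count
    (PySem.List.pyRange 0 count).foldl (fun rects i =>
      let t := y0 + i * (row_height + row_gap)
      let b := if i < count - 1 then t + row_height else y1
      rects ++ [(x0, t, x1, b)]) []
  else if layout = "stacked" then
    (PySem.List.pyRange 0 count).foldl (fun rects _ =>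
      rects ++ [(x0, y0, x1, y1)]) []
  else
    []

-- ===== PORT B =====
-- B: derive (cols, rows, gap); build lefts / col_ivs (zip of lefts with lefts[1:]+[x1])
-- and tops / row_ivs (zip of tops with [t+row_h for t in tops[:-1]]+[y1]); the result is
-- the row-major cross product of the two interval lists, truncated to count.
-- (lefts[1:] is `.drop 1`, tops[:-1] is `.dropLast` — exact per PySem slice_from_one /
-- slice_to_neg_one; `rects[:count]` is PySem.List.slice.)
def calculate_layout_alt (count : Int) (layout : String) (bounds : Int × Int × Int × Int) (row_gap : Int) : List (Int × Int × Int × Int) :=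
  let x0 := bounds.1; let y0 := bounds.2.1; let x1 := bounds.2.2.1; let y1 := bounds.2.2.2
  if layout = "stacked" then
    List.replicate (max count 0).toNat (x0, y0, x1, y1)
  else
    let p : Option (Int × Int × Int) :=
      if layout = "side-by-side" then some (count, 1, 0)
      else if layout = "grid" then
        -- math.isqrt(count) = Nat.sqrt on the nonnegative ints Pre_ admits
        let s : Int := (Nat.sqrt count.toNat : Int)
        let cols := if s * s = count then s else s + 1
        some (cols, -(PySem.Int.floordiv (-count) cols), row_gap)
      else if layout = "rows" then some (1, count, row_gap)
      else none
    match p with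
    | none => []
    | some (cols, rows, gap) =>
      let col_w := PySem.Int.floordiv (x1 - x0) cols
      let row_h := PySem.Int.floordiv (y1 - y0 - gap * (rows - 1)) rows
      let lefts := (PySem.List.pyRange 0 cols).map (fun c => x0 + c * col_w)
      let col_ivs := lefts.zip (lefts.drop 1 ++ [x1])
      let tops := (PySem.List.pyRange 0 rows).map (fun r => y0 + r * (row_h + gap))
      let bottoms := tops.dropLast.map (fun t => t + row_h) ++ [y1]
      let row_ivs := tops.zip bottoms
      let rects := row_ivs.flatMap (fun tb => col_ivs.map (fun lr => (lr.1, tb.1, lr.2, tb.2)))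
      PySem.List.slice rects none (some count)

-- ===== PRECONDITION & SPEC =====
-- Pre_ excludes exactly the inputs on which A raises: count = 0 divides by zero in the
-- "side-by-side"/"grid"/"rows" branches (ZeroDivisionError), and negative count makes
-- math.sqrt raise ValueError in the "grid" branch.
def Pre_calculate_layout (count : Int) (layout : String) (bounds : Int × Int × Int × Int) (row_gap : Int) : Prop :=
  (layout = "side-by-side" → count ≠ 0) ∧ (layout = "grid" → 1 ≤ count) ∧ (layout = "rows" → count ≠ 0)
instance (count : Int) (layout : String) (bounds : Int × Int × Int × Int) (row_gap : Int) : Decidable (Pre_calculate_layout count layout bounds row_gap) := by unfold Pre_calculate_layout; infer_instance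
def pvWitness_calculate_layout : Int × String × (Int × Int × Int × Int) × Int := (3, "grid", (0, 0, 100, 90), 4)
def Spec_calculate_layout (count : Int) (layout : String) (bounds : Int × Int × Int × Int) (row_gap : Int) (out : List (Int × Int × Int × Int)) : Prop := out = calculate_layout_alt count layout bounds row_gap
instance (count : Int) (layout : String) (bounds : Int × Int × Int × Int) (row_gap : Int) (out : List (Int × Int × Int × Int)) : Decidable (Spec_calculate_layout count layout bounds row_gap out) := by unfold Spec_calculate_layout; infer_instance

-- ===== CLAIM =====
def Claim_equal_calculate_layout : Prop := ∀ (count : Int) (layout : String) (bounds : Int × Int × Int × Int) (row_gap : Int), Dom_calculate_layout count layout bounds row_gap → Pre_calculate_layout count layout bounds row_gap → Spec_calculate_layout count layout bounds row_gap (calculate_layout count layout bounds row_gap)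

-- ===== LEMMAS AND PROOFS =====

theorem pvRange0 (n : Int) : PySem.List.pyRange 0 n 1 = (List.range n.toNat).map (fun k : Nat => (k : Int)) := by
  rw [PySem.List.pyRange_one]
  simp

theorem pvRangeMap {α : Type} (n : Int) (f : Int → α) :
    (PySem.List.pyRange 0 n 1).map f = (List.range n.toNat).map (fun k : Nat => f (k : Int)) := by
  rw [pvRange0, List.map_map]
  rfl

theorem pvFloordiv_one (i : Int) : PySem.Int.floordiv i 1 = i := by
  rw [PySem.Int.floordiv_eq_iff_of_pos (by omega : (0:Int) < 1)]
  omega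

theorem pvMod_one (i : Int) : PySem.Int.mod i 1 = 0 := by
  have := PySem.Int.floordiv_mul_add_mod i 1
  rw [pvFloordiv_one i] at this
  omega

theorem pvFloordiv_self_eq_zero {i n : Int} (h0 : 0 ≤ i) (h1 : i < n) :
    PySem.Int.floordiv i n = 0 := by
  have hn : 0 < n := lt_of_le_of_lt h0 h1
  rw [PySem.Int.floordiv_eq_iff_of_pos hn]
  constructor <;> omega

theorem pvMod_self_eq {i n : Int} (h0 : 0 ≤ i) (h1 : i < n) :
    PySem.Int.mod i n = i := by
  have := PySem.Int.floordiv_mul_add_mod i n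
  rw [pvFloordiv_self_eq_zero h0 h1] at this
  omega

-- zip of (range C).map f with a padded tail list: pointwise characterization
theorem pvZipPad (C : Nat) (f g : Nat → Int) (ys : List Int) (z : Int)
    (hlen : ys.length = C - 1) (hget : ∀ k (h : k < ys.length), ys[k] = g k) :
    ((List.range C).map f).zip (ys ++ [z]) =
      (List.range C).map (fun c => (f c, if c + 1 < C then g c else z)) := by
  apply List.ext_getElem
  · simp [hlen]
    omega
  · intro i h1 h2
    have hi : i < C := by simpa using h2
    have hzlen : (ys ++ [z]).length = C := by simp [hlen]; omega
    rw [List.getElem_zip]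
    simp only [List.getElem_map, List.getElem_range]
    congr 1
    by_cases hc : i + 1 < C
    · rw [List.getElem_append_left (by omega : i < ys.length)]
      rw [hget i (by omega), if_pos hc]
    · have hie : i = C - 1 := by omega
      rw [List.getElem_append_right (by omega : ys.length ≤ i)]
      simp [if_neg hc]

-- row-major cross product = enumeration by k/C, k%C
theorem pvFlatMapRange {α : Type} (R C : Nat) (g : Nat → Nat → α) :
    (List.range R).flatMap (fun r => (List.range C).map (g r)) =
      (List.range (R * C)).map (fun k => g (k / C) (k % C)) := by
  induction R with
  | zero => simp
  | succ R ih =>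
    rw [List.range_succ, List.flatMap_append, ih, Nat.succ_mul, List.range_add,
      List.map_append, List.map_map]
    congr 1
    simp only [List.flatMap_cons, List.flatMap_nil, List.append_nil]
    apply List.map_congr_left
    intro c hc
    have hcC : c < C := List.mem_range.mp hc
    have hC : 0 < C := by omega
    have hdiv : (R * C + c) / C = R := by
      rw [Nat.mul_comm R C, Nat.mul_add_div hC, Nat.div_eq_of_lt hcC]
      omega
    have hmod : (R * C + c) % C = c := by
      rw [Nat.mul_comm R C, Nat.mul_add_mod, Nat.mod_eq_of_lt hcC]
    simp [hdiv, hmod]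

-- the generic branch equality: A's per-index loop = B's interval cross product
theorem pvBranch (x0 y0 x1 y1 gap count cw rh : Int) (C R : Nat)
    (hC : 1 ≤ C) (hR : 1 ≤ R) (hcount : 1 ≤ count) (hle : count ≤ (R : Int) * (C : Int)) :
    (PySem.List.pyRange 0 count).map (fun i =>
      (x0 + PySem.Int.mod i (C : Int) * cw,
       y0 + PySem.Int.floordiv i (C : Int) * (rh + gap),
       if PySem.Int.mod i (C : Int) < (C : Int) - 1 then x0 + (PySem.Int.mod i (C : Int) + 1) * cw else x1,
       if PySem.Int.floordiv i (C : Int) < (R : Int) - 1 then y0 + PySem.Int.floordiv i (C : Int) * (rh + gap) + rh else y1))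
    = PySem.List.slice
        ((((PySem.List.pyRange 0 (R : Int)).map (fun r => y0 + r * (rh + gap))).zip
            (((PySem.List.pyRange 0 (R : Int)).map (fun r => y0 + r * (rh + gap))).dropLast.map (fun t => t + rh) ++ [y1])).flatMap
          (fun tb => ((((PySem.List.pyRange 0 (C : Int)).map (fun c => x0 + c * cw)).zip
              (((PySem.List.pyRange 0 (C : Int)).map (fun c => x0 + c * cw)).drop 1 ++ [x1])).map
            (fun lr => (lr.1, tb.1, lr.2, tb.2)))))
        none (some count) := by
  have hmn : ((R * C : Nat) : Int) = (R : Int) * (C : Int) := by push_cast; ring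
  have hle' : count ≤ ((R * C : Nat) : Int) := by rw [hmn]; exact hle
  have hcnt : count.toNat ≤ R * C := by omega
  rw [pvRangeMap count, pvRangeMap ((C : Int)), pvRangeMap ((R : Int))]
  simp only [Int.toNat_natCast]
  rw [pvZipPad C _ (fun c => x0 + ((c + 1 : Nat) : Int) * cw) _ x1
        (by simp) (by
          intro k h
          simp only [List.getElem_drop, List.getElem_map, List.getElem_range]
          push_cast; ring),
      pvZipPad R _ (fun r => y0 + ((r : Nat) : Int) * (rh + gap) + rh) _ y1
        (by simp) (by
          intro k h
          simp only [List.getElem_map, List.getElem_dropLast, List.getElem_range])]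
  rw [List.flatMap_map]
  simp only [List.map_map]
  rw [pvFlatMapRange R C]
  rw [PySem.List.slice_to _ (by omega : (0:Int) ≤ count)]
  rw [← List.map_take, List.take_range]
  have hmin : min count.toNat (R * C) = count.toNat := by omega
  rw [hmin]
  apply List.map_congr_left
  intro k hk
  have hkc : k < count.toNat := List.mem_range.mp hk
  simp only [PySem.Int.mod_natCast, PySem.Int.floordiv_natCast, Function.comp_apply,
    Prod.mk.injEq]
  have hmodC : k % C < C := Nat.mod_lt _ (by omega)
  have hdivR : k / C < R := by
    have h1 : k < R * C := by omega
    exact Nat.div_lt_of_lt_mul (by rw [Nat.mul_comm]; exact h1)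
  refine ⟨trivial, trivial, ?_, ?_⟩
  · split_ifs with h1 h2 h2
    · push_cast; ring
    · omega
    · omega
    · rfl
  · split_ifs with h1 h2 h2
    · rfl
    · omega
    · omega
    · rfl

-- ===== VERDICT =====
theorem calculate_layout_spec : Claim_equal_calculate_layout := by
  intro count layout bounds row_gap _ hpre
  obtain ⟨x0, y0, x1, y1⟩ := bounds
  obtain ⟨hsbs, hgrid, hrows⟩ := hpre
  unfold Spec_calculate_layout
  by_cases h1 : layout = "side-by-side"
  · subst h1
    have hc := hsbs rfl
    simp only [calculate_layout, calculate_layout_alt,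
      if_neg (by decide : ¬ ("side-by-side" = "stacked")), reduceIte]
    rcases Int.lt_or_le count 0 with hneg | hpos0
    · rw [PySem.List.pyRange_one_eq_nil (by omega : count ≤ 0)]
      simp [PySem.List.slice]
    · have hpos : 1 ≤ count := by omega
      have hcc : ((count.toNat : Nat) : Int) = count := Int.toNat_of_nonneg (by omega)
      have E := pvBranch x0 y0 x1 y1 0 count (PySem.Int.floordiv (x1 - x0) count)
        (PySem.Int.floordiv (y1 - y0 - 0 * ((1:Int) - 1)) 1) count.toNat 1
        (by omega) le_rfl hpos (by rw [hcc]; omega)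
      rw [hcc] at E
      simp only [Nat.cast_one] at E
      rw [PySem.List.foldl_append_singleton_eq_map, List.nil_append, ← E]
      apply List.map_congr_left
      intro i hi
      rw [PySem.List.mem_pyRange_one] at hi
      simp only [pvMod_self_eq hi.1 hi.2, pvFloordiv_self_eq_zero hi.1 hi.2]
      norm_num
  · by_cases h2 : layout = "grid"
    · subst h2
      have hg := hgrid rfl
      have hcc : ((count.toNat : Nat) : Int) = count := Int.toNat_of_nonneg (by omega)
      simp only [calculate_layout, calculate_layout_alt, pvCeilSqrtA, pvCeilDivA,
        String.reduceEq, reduceIte]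
      set s : Int := ((Nat.sqrt count.toNat : Nat) : Int) with hs
      set cols : Int := if s * s = count then s else s + 1 with hcols
      have hs0 : 0 ≤ s := by positivity
      have hcolpos : 0 < cols := by
        rw [hcols]
        split_ifs with h
        · have : 0 < count.toNat := by omega
          have := (Nat.sqrt_pos (n := count.toNat)).mpr this
          rw [hs]; exact_mod_cast this
        · omega
      set rows : Int := -PySem.Int.floordiv (-count) cols with hrows'
      have hceil := (PySem.Int.neg_floordiv_neg_eq_iff_of_pos hcolpos).mp hrows'.symm
      have hrowpos : 0 < rows := by nlinarith [hceil.2]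
      have hcC : ((cols.toNat : Nat) : Int) = cols := Int.toNat_of_nonneg (by omega)
      have hcR : ((rows.toNat : Nat) : Int) = rows := Int.toNat_of_nonneg (by omega)
      have E := pvBranch x0 y0 x1 y1 row_gap count (PySem.Int.floordiv (x1 - x0) cols)
        (PySem.Int.floordiv (y1 - y0 - row_gap * (rows - 1)) rows) cols.toNat rows.toNat
        (by omega) (by omega) hg (by rw [hcC, hcR]; exact hceil.2)
      rw [hcC, hcR] at E
      rw [PySem.List.foldl_append_singleton_eq_map, List.nil_append]
      exact E
    · by_cases h3 : layout = "rows"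
      · subst h3
        have hc := hrows rfl
        simp only [calculate_layout, calculate_layout_alt,
          if_neg (by decide : ¬ ("rows" = "side-by-side")),
          if_neg (by decide : ¬ ("rows" = "grid")),
          if_neg (by decide : ¬ ("rows" = "stacked")), reduceIte]
        rcases Int.lt_or_le count 0 with hneg | hpos0
        · rw [PySem.List.pyRange_one_eq_nil (by omega : count ≤ 0)]
          simp [PySem.List.slice]
        · have hpos : 1 ≤ count := by omega
          have hcc : ((count.toNat : Nat) : Int) = count := Int.toNat_of_nonneg (by omega)
          have E := pvBranch x0 y0 x1 y1 row_gap count (PySem.Int.floordiv (x1 - x0) 1)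
            (PySem.Int.floordiv (y1 - y0 - row_gap * (count - 1)) count) 1 count.toNat
            le_rfl (by omega) hpos (by rw [hcc]; omega)
          rw [hcc] at E
          simp only [Nat.cast_one] at E
          rw [PySem.List.foldl_append_singleton_eq_map, List.nil_append, ← E]
          apply List.map_congr_left
          intro i hi
          rw [PySem.List.mem_pyRange_one] at hi
          simp only [pvMod_one, pvFloordiv_one]
          norm_num
      · by_cases h4 : layout = "stacked"
        · subst h4
          simp only [calculate_layout, calculate_layout_alt,
            if_neg (by decide : ¬ ("stacked" = "side-by-side")),
            if_neg (by decide : ¬ ("stacked" = "grid")),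
            if_neg (by decide : ¬ ("stacked" = "rows")), reduceIte]
          rw [PySem.List.foldl_append_singleton_eq_map, List.nil_append, pvRange0,
            List.map_map]
          rw [show ((fun _ => (x0, y0, x1, y1)) ∘ fun k : Nat => (k : Int)) = (fun _ : Nat => (x0, y0, x1, y1)) from rfl,
            List.map_const', List.length_range]
          congr 1
          omega
        · simp only [calculate_layout, calculate_layout_alt,
            if_neg h1, if_neg h2, if_neg h3, if_neg h4]
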